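-- pv_equiv track=rewrite | github.com/eflipe/python-exercises | codewars/string_vowels.py | gordon
-- ===== SOURCE A (Python) =====
-- def gordon(a):
--     a=a.upper()
--     a=a.replace(' ', '!!!! ')
--     a=a.replace('A', '@')
--     vowels = ['E', 'I', 'O', 'U']
--     for each in vowels:
--         a=a.replace(each, '*')
--     return a + '!!!!'
-- ===== SOURCE B (Python) =====
-- def gordon(a):
--     table = {' ': '!!!! ', 'A': '@', 'E': '*', 'I': '*', 'O': '*', 'U': '*'}
--     return ''.join(table.get(c, c) for c in a.upper()) + '!!!!'
-- ===== Notes on version B (the rewrite author's own statement) =====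
-- stated objective: idiomatic
-- what changed: Replaces five sequential full-string replace passes (after uppercasing) by one table-driven pass: a dict mapping space, the letter A and each vowel to its substitution, applied per character in a single join.
import Mathlib
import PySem

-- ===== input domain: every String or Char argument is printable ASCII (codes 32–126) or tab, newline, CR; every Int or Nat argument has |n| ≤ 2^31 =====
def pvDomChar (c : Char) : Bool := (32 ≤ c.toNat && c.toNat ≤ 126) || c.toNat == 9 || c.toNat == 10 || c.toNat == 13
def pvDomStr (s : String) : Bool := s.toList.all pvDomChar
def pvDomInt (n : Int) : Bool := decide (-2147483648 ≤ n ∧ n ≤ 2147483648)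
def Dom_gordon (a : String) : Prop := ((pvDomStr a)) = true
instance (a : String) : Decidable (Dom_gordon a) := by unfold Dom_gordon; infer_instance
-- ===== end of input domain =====

-- B replaces A's five sequential full-string .replace passes by one table-driven
-- pass over the uppercased string (idiomatic; return value identical).

-- ===== PORT A =====
-- literal transliteration of A: upper, then the chained replaces, then the vowel loop, then ++ "!!!!"
def gordon (a : String) : String :=
  let a1 := PySem.Str.upper a
  let a2 := PySem.Str.replace a1 " " "!!!! "
  let a3 := PySem.Str.replace a2 "A" "@"
  let vowels : List String := ["E", "I", "O", "U"]
  let a4 := vowels.foldl (fun s each => PySem.Str.replace s each "*") a3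
  a4 ++ "!!!!"

-- ===== PORT B =====
-- table.get(c, c) of Source B's dict, in the dict's key order
def gordonTable (c : Char) : List Char :=
  if c = ' ' then "!!!! ".toList
  else if c = 'A' then "@".toList
  else if c = 'E' ∨ c = 'I' ∨ c = 'O' ∨ c = 'U' then "*".toList
  else [c]

-- ''.join(table.get(c, c) for c in a.upper()) + '!!!!'
def gordon_alt (a : String) : String :=
  String.ofList ((PySem.Str.upper a).toList.flatMap gordonTable ++ "!!!!".toList)

-- ===== PRECONDITION & SPEC =====
def Spec_gordon (a : String) (out : String) : Prop := out = gordon_alt a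
instance (a : String) (out : String) : Decidable (Spec_gordon a out) := by unfold Spec_gordon; infer_instance

-- ===== CLAIM (what is proved, stated in full; the proofs are below) =====
def Claim_equal_gordon : Prop := ∀ (a : String), Dom_gordon a → Spec_gordon a (gordon a)

-- ===== LEMMAS AND PROOFS =====

-- one-char substitution as a flatMap
def sub1 (c0 : Char) (new : List Char) (l : List Char) : List Char :=
  l.flatMap (fun x => if x = c0 then new else [x])

theorem replace_go_single (c0 : Char) (new : List Char) :
    ∀ (l acc : List Char),
      PySem.Chars.replace.go [c0] new l.length l acc = acc.reverse ++ sub1 c0 new l := by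
  intro l
  induction l with
  | nil => intro acc; simp [PySem.Chars.replace.go, sub1]
  | cons c t ih =>
      intro acc
      show PySem.Chars.replace.go [c0] new (t.length + 1) (c :: t) acc = _
      rw [PySem.Chars.replace.go]
      by_cases h : c0 = c
      · subst h
        simp only [List.isPrefixOf, List.length_cons, beq_self_eq_true, Bool.true_and,
          if_true, List.length_nil, List.drop_succ_cons, List.drop_zero]
        rw [ih]
        simp [sub1]
      · have : List.isPrefixOf [c0] (c :: t) = false := by
          simp [List.isPrefixOf, h]
        simp only [this, Bool.false_eq_true, if_false]
        rw [ih]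
        simp only [sub1, List.flatMap_cons]
        rw [if_neg (fun hh => h hh.symm)]
        simp

theorem replace_single (c0 : Char) (new l : List Char) :
    PySem.Chars.replace l [c0] new = sub1 c0 new l := by
  rw [PySem.Chars.replace]
  simp [replace_go_single]

-- composing the five one-char substitutions on a single char gives the table entry
theorem chain_char (c : Char) :
    sub1 'U' "*".toList (sub1 'O' "*".toList (sub1 'I' "*".toList (sub1 'E' "*".toList
      (sub1 'A' "@".toList (sub1 ' ' "!!!! ".toList [c]))))) = gordonTable c := by
  by_cases h1 : c = ' '
  · subst h1; decide
  by_cases h2 : c = 'A'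
  · subst h2; decide
  by_cases h3 : c = 'E'
  · subst h3; decide
  by_cases h4 : c = 'I'
  · subst h4; decide
  by_cases h5 : c = 'O'
  · subst h5; decide
  by_cases h6 : c = 'U'
  · subst h6; decide
  · simp [sub1, gordonTable, h1, h2, h3, h4, h5, h6]

theorem sub1_flatMap (c0 : Char) (new : List Char) (l : List Char) (f : Char → List Char) :
    sub1 c0 new (l.flatMap f) = l.flatMap (fun c => sub1 c0 new (f c)) := by
  simp [sub1, List.flatMap_assoc]

theorem chain_list (l : List Char) :
    sub1 'U' "*".toList (sub1 'O' "*".toList (sub1 'I' "*".toList (sub1 'E' "*".toList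
      (sub1 'A' "@".toList (sub1 ' ' "!!!! ".toList l))))) = l.flatMap gordonTable := by
  have hl : sub1 ' ' "!!!! ".toList l = l.flatMap (fun c => sub1 ' ' "!!!! ".toList [c]) := by
    simp [sub1]
  rw [hl, sub1_flatMap, sub1_flatMap, sub1_flatMap, sub1_flatMap, sub1_flatMap]
  apply List.flatMap_congr
  intro c _
  exact chain_char c

theorem gordon_toList (a : String) :
    (gordon a).toList = (PySem.Str.upper a).toList.flatMap gordonTable ++ "!!!!".toList := by
  simp only [gordon, List.foldl_cons, List.foldl_nil, String.toList_append,
    PySem.Str.toList_replace]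
  refine congrArg (fun l => l ++ ("!!!!" : String).toList) ?_
  rw [show (" " : String).toList = [' '] from rfl, show ("A" : String).toList = ['A'] from rfl,
    show ("E" : String).toList = ['E'] from rfl, show ("I" : String).toList = ['I'] from rfl,
    show ("O" : String).toList = ['O'] from rfl, show ("U" : String).toList = ['U'] from rfl]
  rw [replace_single, replace_single, replace_single, replace_single, replace_single,
    replace_single]
  exact chain_list _

-- ===== VERDICT (by name: the statement is the Claim_ definition above) =====
theorem gordon_spec : Claim_equal_gordon := by
  intro a _
  show gordon a = gordon_alt a
  apply String.toList_inj.mp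
  rw [gordon_toList a]
  simp [gordon_alt]
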